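-- pv_equiv track=rewrite | github.com/ernstmul/ET4285 | simone_scripts/pkt_loss_percentages.py | div_list
-- ===== SOURCE A (Python) =====
-- def div_list(list_t, delta):
--     start_t = list_t[0][0]
--     end_t = list_t[-1][0] + delta
--     t = start_t
--     pkts_in_delta = []
--     i = 0
--     temp = []
--     while len(list_t) != 0 and t < end_t:
--         if list_t[0][0] <= t + delta:
--             temp.append(list_t.pop(0))
--         else:
--             pkts_in_delta.append(temp)
--             temp = []
--             t += delta
--
--     return pkts_in_delta
-- ===== SOURCE B (Python) =====
-- def div_list(list_t, delta):
--     """Bucket timestamped packets into consecutive delta-wide time windows.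
--
--     Single streaming pass (does not consume list_t, unlike the original which
--     empties it): a window is flushed when a packet beyond its bound arrives,
--     bucketing stops once the window start reaches end = last_ts + delta, and
--     the still-open window is not emitted.
--     """
--     start = list_t[0][0]
--     end = list_t[-1][0] + delta
--     windows = []
--     current = []
--     t = start
--     for p in list_t:
--         while t < end and p[0] > t + delta:
--             windows.append(current)
--             current = []
--             t += delta
--         if t >= end:
--             return windows
--         current.append(p)
--     return windows
-- ===== Notes on version B (the rewrite author's own statement) =====
-- stated objective: alternative
-- what changed: Replaces A's destructive queue simulation (pop(0) from the front of list_t inside a single while loop) by a non-mutating streaming pass over the packets with a lazy window-advance inner loop and an early return at the end bound; Pre_ excludes delta <= 0 (A loops forever except in degenerate cases where it returns []) and the empty list / empty packets (IndexError).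
-- outside the precondition, e.g. on div_list([(2,), (0,)], -1): A returns [], B returns []
import Mathlib
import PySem

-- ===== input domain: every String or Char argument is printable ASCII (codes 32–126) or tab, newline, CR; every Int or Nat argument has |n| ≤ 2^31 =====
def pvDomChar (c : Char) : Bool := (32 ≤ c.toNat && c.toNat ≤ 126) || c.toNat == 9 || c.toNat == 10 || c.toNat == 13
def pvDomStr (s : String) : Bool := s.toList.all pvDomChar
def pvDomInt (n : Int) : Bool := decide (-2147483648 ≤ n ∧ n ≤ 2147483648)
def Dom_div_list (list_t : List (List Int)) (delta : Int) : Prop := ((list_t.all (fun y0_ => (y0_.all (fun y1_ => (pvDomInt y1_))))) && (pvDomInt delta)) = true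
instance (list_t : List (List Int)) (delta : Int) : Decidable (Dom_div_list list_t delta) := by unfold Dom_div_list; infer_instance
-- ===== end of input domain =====

-- B replaces A's destructive pop(0) queue simulation by a non-mutating single streaming pass
-- (lazy window-advance inner loop, early return at the end bound); equivalence is about the
-- RETURN value only — Python A empties list_t in place, B leaves it untouched.


-- ===== PORT A =====
-- A's while loop; fuel only makes it total in Lean (under Pre_ it never runs out).
-- list_t[0][0] is `p.headI`: Pre_ guarantees every packet is nonempty, so headI is exact there.
def divListGo (endT delta : Int) : Nat → List (List Int) → Int → List (List (List Int)) → List (List Int) → List (List (List Int))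
  | 0, _, _, pkts, _ => pkts
  | fuel + 1, lst, t, pkts, temp =>
    match lst with
    | [] => pkts
    | p :: rest =>
      if t < endT then
        if p.headI ≤ t + delta then
          divListGo endT delta fuel rest t pkts (temp ++ [p])
        else
          divListGo endT delta fuel (p :: rest) (t + delta) (pkts ++ [temp]) []
      else pkts

def div_list (list_t : List (List Int)) (delta : Int) : List (List (List Int)) :=
  match list_t with
  | [] => []  -- Python raises IndexError here (list_t[0]); excluded by Pre_
  | p0 :: _ =>
    let start := p0.headI                                   -- list_t[0][0]
    let endT := (list_t.getLastD []).headI + delta          -- list_t[-1][0] + delta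
    divListGo endT delta (list_t.length + (endT - start).toNat + 1) list_t start [] []

-- ===== PORT B =====
-- B's inner `while t < end and p[0] > t + delta` loop; the fuel (endT - t).toNat only makes it
-- total in Lean (with delta ≥ 1 it suffices exactly, since t grows by delta each step).
def divAltAdv (endT delta pHead : Int) : Nat → Int → List (List Int) → List (List (List Int)) → Int × List (List Int) × List (List (List Int))
  | 0, t, cur, ws => (t, cur, ws)
  | fuel + 1, t, cur, ws =>
    if t < endT ∧ t + delta < pHead then divAltAdv endT delta pHead fuel (t + delta) [] (ws ++ [cur])
    else (t, cur, ws)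

-- B's `for p in list_t` loop with the early `return windows`
def divAltGo (endT delta : Int) : List (List Int) → Int → List (List Int) → List (List (List Int)) → List (List (List Int))
  | [], _, _, ws => ws
  | p :: rest, t, cur, ws =>
    let s := divAltAdv endT delta p.headI (endT - t).toNat t cur ws
    if endT ≤ s.1 then s.2.2
    else divAltGo endT delta rest s.1 (s.2.1 ++ [p]) s.2.2

def div_list_alt (list_t : List (List Int)) (delta : Int) : List (List (List Int)) :=
  match list_t with
  | [] => []  -- Python raises IndexError here (list_t[0]); excluded by Pre_
  | p0 :: _ =>
    let start := p0.headI
    let endT := (list_t.getLastD []).headI + delta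
    divAltGo endT delta list_t start [] []

-- ===== PRECONDITION & SPEC =====
-- Pre_ excludes delta ≤ 0, where A (and B) loop forever except in degenerate cases in which
-- both return [], and the empty list / empty packets, on which A raises IndexError.
def Pre_div_list (list_t : List (List Int)) (delta : Int) : Prop :=
  list_t ≠ [] ∧ (∀ p ∈ list_t, p ≠ []) ∧ 1 ≤ delta
instance (list_t : List (List Int)) (delta : Int) : Decidable (Pre_div_list list_t delta) := by
  unfold Pre_div_list; infer_instance

def pvWitness_div_list : List (List Int) × Int := ([[0, 7], [1, 9], [4, 2]], 2)

def Spec_div_list (list_t : List (List Int)) (delta : Int) (out : List (List (List Int))) : Prop := out = div_list_alt list_t delta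
instance (list_t : List (List Int)) (delta : Int) (out : List (List (List Int))) : Decidable (Spec_div_list list_t delta out) := by unfold Spec_div_list; infer_instance

-- ===== CLAIM (what is proved, stated in full; the proofs are below) =====
def Claim_equal_div_list : Prop := ∀ (list_t : List (List Int)) (delta : Int), Dom_div_list list_t delta → Pre_div_list list_t delta → Spec_div_list list_t delta (div_list list_t delta)

-- ===== LEMMAS AND PROOFS =====

-- fuel-irrelevance for B's inner loop: any two fuels ≥ (endT - t).toNat agree (delta ≥ 1)
lemma divAltAdv_fuel (endT delta pHead : Int) (hd : 1 ≤ delta) :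
    ∀ (f g : Nat) (t : Int) (cur : List (List Int)) (ws : List (List (List Int))),
      (endT - t).toNat ≤ f → (endT - t).toNat ≤ g →
      divAltAdv endT delta pHead f t cur ws = divAltAdv endT delta pHead g t cur ws := by
  intro f
  induction f with
  | zero =>
    intro g t cur ws hf hg
    have ht : ¬ (t < endT) := by omega
    have hc : ¬ (t < endT ∧ t + delta < pHead) := fun h => ht h.1
    cases g with
    | zero => rfl
    | succ g => simp [divAltAdv, if_neg hc]
  | succ f ih =>
    intro g t cur ws hf hg
    by_cases hc : t < endT ∧ t + delta < pHead
    · have ht : t < endT := hc.1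
      have hg1 : ∃ g', g = g' + 1 := ⟨g - 1, by omega⟩
      obtain ⟨g', rfl⟩ := hg1
      simp only [divAltAdv]
      rw [if_pos hc, if_pos hc]
      exact ih g' (t + delta) [] (ws ++ [cur]) (by omega) (by omega)
    · cases g with
      | zero =>
        have ht : ¬ (t < endT) := by
          intro h
          omega
        simp [divAltAdv, if_neg hc]
      | succ g => simp [divAltAdv, if_neg hc]

-- A's loop equals B's loop on every state, given sufficient fuel for A (delta ≥ 1)
lemma div_list_go_eq (endT delta : Int) (hd : 1 ≤ delta) :
    ∀ (fA : Nat) (lst : List (List Int)) (t : Int)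
      (pkts : List (List (List Int))) (temp : List (List Int)),
      lst.length + (endT - t).toNat + 1 ≤ fA →
      divListGo endT delta fA lst t pkts temp = divAltGo endT delta lst t temp pkts := by
  intro fA
  induction fA with
  | zero => intro lst t pkts temp h; omega
  | succ fA ih =>
    intro lst t pkts temp h
    cases lst with
    | nil => simp [divListGo, divAltGo]
    | cons p rest =>
      by_cases ht : t < endT
      · have hm : ∃ m, (endT - t).toNat = m + 1 := ⟨(endT - t).toNat - 1, by omega⟩
        obtain ⟨m, hm⟩ := hm
        by_cases hp : p.headI ≤ t + delta
        · have hc : ¬ (t < endT ∧ t + delta < p.headI) := fun hh => by omega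
          simp only [divListGo, if_pos ht, if_pos hp]
          rw [ih rest t pkts (temp ++ [p]) (by simp only [List.length_cons] at h; omega)]
          simp only [divAltGo, hm, divAltAdv, if_neg hc]
          rw [if_neg (by omega : ¬ endT ≤ t)]
        · have hc : t < endT ∧ t + delta < p.headI := ⟨ht, by omega⟩
          simp only [divListGo, if_pos ht, if_neg hp]
          rw [ih (p :: rest) (t + delta) (pkts ++ [temp]) []
            (by simp only [List.length_cons] at h ⊢; omega)]
          simp only [divAltGo, hm, divAltAdv, if_pos hc]
          rw [divAltAdv_fuel endT delta p.headI hd m ((endT - (t + delta)).toNat)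
            (t + delta) [] (pkts ++ [temp]) (by omega) le_rfl]
      · have h0 : (endT - t).toNat = 0 := by omega
        simp only [divListGo, if_neg ht, divAltGo, h0, divAltAdv]
        rw [if_pos (by omega : endT ≤ t)]

-- ===== VERDICT (by name: the statement is the Claim_ definition above) =====
theorem div_list_spec : Claim_equal_div_list := by
  intro list_t delta _ hpre
  obtain ⟨hne, _, hd⟩ := hpre
  unfold Spec_div_list
  cases list_t with
  | nil => exact absurd rfl hne
  | cons p0 rest =>
    exact div_list_go_eq _ delta hd _ (p0 :: rest) p0.headI [] [] le_rfl
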